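-- pv_equiv track=rewrite | github.com/omerap12/LeetCodeSolutions | python3/Medium/find_closest_node_to_given_two_nodes.py | bfs
-- ===== SOURCE A (Python) =====
-- def bfs(start, neighbors_list: dict[int]) -> dict[int]:
--     visited = {start}
--     stack = [start]
--     distances = {start: 0}
--     while stack:
--         curr = stack.pop()
--         if curr not in neighbors_list.keys():
--             continue
--         next_vertex = neighbors_list[curr]
--         if next_vertex not in visited:
--             visited.add(next_vertex)
--             distances[next_vertex] = distances[curr] + 1
--             stack.append(next_vertex)
--     return distances
-- ===== SOURCE B (Python) =====
-- def bfs(start, neighbors_list: dict[int]) -> dict[int]: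
--     # B: pointer-following along the single-successor chain; distances doubles as the visited set.
--     distances = {start: 0}
--     curr = start
--     while curr in neighbors_list:
--         nxt = neighbors_list[curr]
--         if nxt in distances:
--             break
--         distances[nxt] = distances[curr] + 1
--         curr = nxt
--     return distances
-- ===== Notes on version B (the rewrite author's own statement) =====
-- stated objective: simpler
-- what changed: Replaces A's explicit stack and separate visited set with a single pointer-following loop along the unique-successor chain, using the distances dict itself as the visited set.
import Mathlib
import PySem

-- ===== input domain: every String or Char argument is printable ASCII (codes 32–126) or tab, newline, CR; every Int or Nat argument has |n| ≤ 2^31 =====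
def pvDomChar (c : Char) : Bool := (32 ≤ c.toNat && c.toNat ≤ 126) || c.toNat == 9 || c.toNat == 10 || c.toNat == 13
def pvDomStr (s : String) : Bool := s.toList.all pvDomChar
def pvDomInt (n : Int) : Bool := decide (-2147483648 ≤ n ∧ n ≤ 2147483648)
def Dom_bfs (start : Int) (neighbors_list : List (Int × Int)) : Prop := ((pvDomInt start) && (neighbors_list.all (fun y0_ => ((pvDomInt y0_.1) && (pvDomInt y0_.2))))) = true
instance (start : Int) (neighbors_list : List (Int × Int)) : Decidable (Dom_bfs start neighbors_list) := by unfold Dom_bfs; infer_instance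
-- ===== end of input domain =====

-- B replaces A's stack + visited set by a single pointer-following loop whose distances dict doubles
-- as the visited set (objective: simpler; same asymptotic cost).

-- ===== PORT A =====
-- A's while-loop over (visited, stack, distances); fuel = |neighbors_list| + 1 pops always suffices
-- (each pop that pushes consumes a fresh key), and when fuel runs out the stack is already empty,
-- so the fuel-0 branch returns the same `distances` Python returns.
def bfsLoopA (nb : PySem.Dict Int Int) :
    Nat → PySem.Set Int → List Int → PySem.Dict Int Int → PySem.Dict Int Int
  | 0, _, _, distances => distances
  | fuel+1, visited, stack, distances =>
    match PySem.List.pop? stack (-1) with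
    | none => distances                                    -- while stack: — stack empty, loop ends
    | some (curr, rest) =>
      if nb.contains curr = false then                     -- if curr not in neighbors_list.keys(): continue
        bfsLoopA nb fuel visited rest distances
      else
        let next_vertex := nb.getD curr 0                  -- neighbors_list[curr] (key present)
        if PySem.Set.contains visited next_vertex = false then
          bfsLoopA nb fuel (PySem.Set.add visited next_vertex) (rest ++ [next_vertex])
            (distances.insert next_vertex (distances.getD curr 0 + 1))
        else
          bfsLoopA nb fuel visited rest distances

def bfs (start : Int) (neighbors_list : List (Int × Int)) : List (Int × Int) :=
  (bfsLoopA (PySem.Dict.mk neighbors_list) (neighbors_list.length + 1)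
    (PySem.Set.add PySem.Set.empty start) [start]
    ((PySem.Dict.empty).insert start 0)).items

-- ===== PORT B =====
-- B's while-loop over (distances, curr); same fuel bound (each advance consumes a fresh key).
def bfsLoopB (nb : PySem.Dict Int Int) :
    Nat → PySem.Dict Int Int → Int → PySem.Dict Int Int
  | 0, distances, _ => distances
  | fuel+1, distances, curr =>
    if nb.contains curr then                               -- while curr in neighbors_list:
      let nxt := nb.getD curr 0
      if distances.contains nxt then distances             -- break
      else bfsLoopB nb fuel (distances.insert nxt (distances.getD curr 0 + 1)) nxt
    else distances

def bfs_alt (start : Int) (neighbors_list : List (Int × Int)) : List (Int × Int) :=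
  (bfsLoopB (PySem.Dict.mk neighbors_list) (neighbors_list.length + 1)
    ((PySem.Dict.empty).insert start 0) start).items

-- ===== PRECONDITION & SPEC =====
def Spec_bfs (start : Int) (neighbors_list : List (Int × Int)) (out : List (Int × Int)) : Prop := out = bfs_alt start neighbors_list
instance (start : Int) (neighbors_list : List (Int × Int)) (out : List (Int × Int)) : Decidable (Spec_bfs start neighbors_list out) := by unfold Spec_bfs; infer_instance

-- ===== CLAIM (what is proved, stated in full; the proofs are below) =====
def Claim_equal_bfs : Prop := ∀ (start : Int) (neighbors_list : List (Int × Int)), Dom_bfs start neighbors_list → Spec_bfs start neighbors_list (bfs start neighbors_list)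

-- ===== LEMMAS AND PROOFS =====

-- A's loop on an empty stack returns distances, at any fuel.
lemma bfsLoopA_nil (nb : PySem.Dict Int Int) (f : Nat) (V : PySem.Set Int)
    (d : PySem.Dict Int Int) : bfsLoopA nb f V [] d = d := by
  cases f <;> simp [bfsLoopA, PySem.List.pop?, PySem.List.pyIdx?]

-- Adding the new vertex to `visited` and inserting it into `distances` preserves
-- "visited = the key set of distances".
lemma contains_add_insert (V : PySem.Set Int) (d : PySem.Dict Int Int) (n v : Int)
    (h : ∀ x : Int, PySem.Set.contains V x = d.contains x) :
    ∀ x : Int, PySem.Set.contains (V.add n) x = (d.insert n v).contains x := by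
  intro x
  rw [Bool.eq_iff_iff, PySem.Dict.contains_insert]
  simp [PySem.Set.mem_add, ← h x, or_comm]

-- Core: with the stack holding exactly [curr] and visited agreeing with distances' keys,
-- A's loop equals B's loop at the same fuel.
lemma loopA_eq_loopB (nb : PySem.Dict Int Int) :
    ∀ (f : Nat) (V : PySem.Set Int) (d : PySem.Dict Int Int) (c : Int),
      (∀ x : Int, PySem.Set.contains V x = d.contains x) →
      bfsLoopA nb f V [c] d = bfsLoopB nb f d c := by
  intro f
  induction f with
  | zero => intro V d c _; rfl
  | succ f ih =>
    intro V d c hV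
    have hpop : PySem.List.pop? [c] (-1) = some (c, ([] : List Int)) := by
      simp [PySem.List.pop?, PySem.List.pyIdx?]
    simp only [bfsLoopA, bfsLoopB, hpop]
    by_cases hc : nb.contains c = true
    · simp only [hc, if_true]
      by_cases hn : d.contains (nb.getD c 0) = true
      · have hv : nb.getD c 0 ∈ V := (PySem.Set.contains_iff _ _).mp (by rw [hV]; exact hn)
        simp [hn, hv, bfsLoopA_nil]
      · simp only [Bool.not_eq_true] at hn
        have hv : PySem.Set.contains V (nb.getD c 0) = false := by rw [hV]; exact hn
        simp only [hn, hv, Bool.false_eq_true, if_false, if_true]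
        exact ih _ _ _ (contains_add_insert V d _ _ hV)
    · simp only [Bool.not_eq_true] at hc
      simp [hc, bfsLoopA_nil]

-- ===== VERDICT (by name: the statement is the Claim_ definition above) =====
theorem bfs_spec : Claim_equal_bfs := by
  intro start neighbors_list _
  unfold Spec_bfs bfs bfs_alt
  congr 1
  apply loopA_eq_loopB
  intro x
  rw [Bool.eq_iff_iff, PySem.Dict.contains_insert, PySem.Set.contains_iff, PySem.Set.mem_add]
  constructor
  · rintro (h | h)
    · exact absurd h (by simp [PySem.Set.empty])
    · simp [h]
  · intro h
    rcases Bool.or_eq_true_iff.mp h with h | h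
    · exact Or.inr (by simpa using h)
    · exact absurd h (by simp [PySem.Dict.contains_empty])
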